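-- pv_equiv track=rewrite | github.com/dev-hang/Programmers-Algorithm | level2/puzzle_game_challenge.py | puzzle_game_challenge
-- ===== SOURCE A (Python) =====
-- def puzzle_game_challenge(diffs, times, limit):
--     min_level = min(diffs)
--     max_level = max(diffs)
--
--     while min_level <= max_level:
--         lm = limit
--         level = (min_level + max_level) // 2
--         for i in range(len(diffs)):
--             if diffs[i] <= level:
--                 lm -= times[i]
--             else:
--                 lm -= (times[i] + times[i - 1]) * (diffs[i] - level) + times[i]
--
--         if lm >= 0:
--             max_level = level - 1
--         else:
--             min_level = level + 1
--
--     return min_level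
-- ===== SOURCE B (Python) =====
-- def puzzle_game_challenge(diffs, times, limit):
--     n = len(diffs)
--     T = sum(times[:n])
--     pairs = sorted(((diffs[i], times[i] + times[i - 1]) for i in range(n)),
--                    key=lambda p: p[0])
--     ds = [p[0] for p in pairs]
--     # suffix sums: sw[k] = sum of w over pairs[k:], swd[k] = sum of w*d over pairs[k:]
--     sw = [0]
--     swd = [0]
--     for d, w in reversed(pairs):
--         sw.append(sw[-1] + w)
--         swd.append(swd[-1] + w * d)
--     sw.reverse()
--     swd.reverse()
--
--     def first_above(level):
--         # index of first element of ds greater than level (ds is sorted)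
--         lo, hi = 0, n
--         while lo < hi:
--             mid = (lo + hi) // 2
--             if ds[mid] <= level:
--                 lo = mid + 1
--             else:
--                 hi = mid
--         return lo
--
--     mn = min(diffs)
--     mx = max(diffs)
--     while mn <= mx:
--         level = (mn + mx) // 2
--         k = first_above(level)
--         cost = T + (swd[k] - level * sw[k])
--         if cost <= limit:
--             mx = level - 1
--         else:
--             mn = level + 1
--     return mn
-- ===== Notes on version B (the rewrite author's own statement) =====
-- stated objective: faster
-- what changed: A re-scans all n puzzles on every binary-search probe; B sorts the (diff, time[i]+time[i-1]) pairs once, precomputes suffix sums of w and w*diff, and answers each probe's cost query with an inner binary search over the sorted diffs in O(log n).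
-- outside the precondition, e.g. on puzzle_game_challenge([2, 1], [3], 10): A raises IndexError, B raises IndexError; on puzzle_game_challenge([], [], 5): A raises ValueError, B raises ValueError
import Mathlib
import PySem

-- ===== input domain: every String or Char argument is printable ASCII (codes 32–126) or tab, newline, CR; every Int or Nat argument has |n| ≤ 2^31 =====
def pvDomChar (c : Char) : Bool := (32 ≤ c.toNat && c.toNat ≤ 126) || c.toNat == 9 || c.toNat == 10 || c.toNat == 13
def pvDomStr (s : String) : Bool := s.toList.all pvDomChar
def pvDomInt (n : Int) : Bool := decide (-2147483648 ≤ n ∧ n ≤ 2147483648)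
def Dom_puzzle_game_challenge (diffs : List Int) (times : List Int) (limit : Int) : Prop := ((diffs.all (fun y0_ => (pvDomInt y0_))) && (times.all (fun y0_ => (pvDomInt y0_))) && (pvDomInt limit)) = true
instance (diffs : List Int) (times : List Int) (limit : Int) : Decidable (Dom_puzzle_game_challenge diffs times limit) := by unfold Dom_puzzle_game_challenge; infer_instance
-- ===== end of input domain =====

-- B sorts the (diff, w) pairs once with suffix sums and answers each probe's
-- cost query by an inner binary search (objective: faster, asymptotically).

-- ===== PORT A =====
-- A's outer `while min_level <= max_level` loop; the inner `for i in range(len(diffs))` is the foldl.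
def pgcLoopA (diffs times : List Int) (limit : Int) (mn mx : Int) : Int :=
  if h : mn ≤ mx then
    let level := PySem.Int.floordiv (mn + mx) 2
    let lm := (PySem.List.pyRange 0 (diffs.length : Int)).foldl
      (fun lm i =>
        if PySem.List.pyGetD diffs i 0 ≤ level then
          lm - PySem.List.pyGetD times i 0
        else
          lm - ((PySem.List.pyGetD times i 0 + PySem.List.pyGetD times (i - 1) 0)
                  * (PySem.List.pyGetD diffs i 0 - level)
                + PySem.List.pyGetD times i 0))
      limit
    if lm ≥ 0 then pgcLoopA diffs times limit mn (level - 1)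
    else pgcLoopA diffs times limit (level + 1) mx
  else mn
termination_by (mx - mn + 1).toNat
decreasing_by
  · have := PySem.Int.floordiv_two_mid_bounds h; omega
  · have := PySem.Int.floordiv_two_mid_bounds h; omega

def puzzle_game_challenge (diffs : List Int) (times : List Int) (limit : Int) : Int :=
  -- min(diffs) / max(diffs); Pre_ excludes diffs = [] (Python ValueError)
  let mn := (PySem.List.min? diffs (fun x => x)).getD 0
  let mx := (PySem.List.max? diffs (fun x => x)).getD 0
  pgcLoopA diffs times limit mn mx

-- ===== PORT B =====
-- suffix-sum list of f over pairs: result[k] = sum of f over pairs[k:]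
-- (Source B builds it with a reversed loop; here the structural recursion over the list)
def pgcSuffix (f : Int × Int → Int) : List (Int × Int) → List Int
  | [] => [0]
  | p :: rest => (f p + (pgcSuffix f rest).headD 0) :: pgcSuffix f rest

-- Source B's hand-written `first_above` binary search over the sorted ds
def pgcFirstAbove (ds : List Int) (level : Int) (lo hi : Nat) : Nat :=
  if _h : lo < hi then
    let mid := (lo + hi) / 2
    if ds.getD mid 0 ≤ level then pgcFirstAbove ds level (mid + 1) hi
    else pgcFirstAbove ds level lo mid
  else lo
termination_by hi - lo
decreasing_by all_goals omega

-- B's outer binary-search loop: each probe costs one inner binary search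
def pgcLoopB (T : Int) (ds sw swd : List Int) (limit : Int) (mn mx : Int) : Int :=
  if h : mn ≤ mx then
    let level := PySem.Int.floordiv (mn + mx) 2
    let k := pgcFirstAbove ds level 0 ds.length
    let cost := T + (swd.getD k 0 - level * sw.getD k 0)
    if cost ≤ limit then pgcLoopB T ds sw swd limit mn (level - 1)
    else pgcLoopB T ds sw swd limit (level + 1) mx
  else mn
termination_by (mx - mn + 1).toNat
decreasing_by
  · have := PySem.Int.floordiv_two_mid_bounds h; omega
  · have := PySem.Int.floordiv_two_mid_bounds h; omega

def puzzle_game_challenge_alt (diffs : List Int) (times : List Int) (limit : Int) : Int :=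
  let n : Int := diffs.length
  let T := (PySem.List.slice times none (some n)).sum
  let pairs := PySem.List.sorted
    ((PySem.List.pyRange 0 n).map
      (fun i => (PySem.List.pyGetD diffs i 0,
                 PySem.List.pyGetD times i 0 + PySem.List.pyGetD times (i - 1) 0)))
    (fun p => p.1)
  let ds := pairs.map (fun p => p.1)
  let sw := pgcSuffix (fun p => p.2) pairs
  let swd := pgcSuffix (fun p => p.2 * p.1) pairs
  let mn := (PySem.List.min? diffs (fun x => x)).getD 0
  let mx := (PySem.List.max? diffs (fun x => x)).getD 0
  pgcLoopB T ds sw swd limit mn mx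

-- ===== PRECONDITION & SPEC =====
-- Pre_ excludes exactly the inputs where A raises: diffs = [] (min() ValueError) and
-- times shorter than diffs (IndexError on times[i]).
def Pre_puzzle_game_challenge (diffs : List Int) (times : List Int) (limit : Int) : Prop :=
  diffs ≠ [] ∧ diffs.length ≤ times.length
instance (diffs : List Int) (times : List Int) (limit : Int) : Decidable (Pre_puzzle_game_challenge diffs times limit) := by unfold Pre_puzzle_game_challenge; infer_instance

def pvWitness_puzzle_game_challenge : List Int × List Int × Int := ([3, 1, 2], [4, 5, 6], 20)

def Spec_puzzle_game_challenge (diffs : List Int) (times : List Int) (limit : Int) (out : Int) : Prop := out = puzzle_game_challenge_alt diffs times limit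
instance (diffs : List Int) (times : List Int) (limit : Int) (out : Int) : Decidable (Spec_puzzle_game_challenge diffs times limit out) := by unfold Spec_puzzle_game_challenge; infer_instance

-- ===== CLAIM (what is proved, stated in full; the proofs are below) =====
def Claim_equal_puzzle_game_challenge : Prop := ∀ (diffs : List Int) (times : List Int) (limit : Int), Dom_puzzle_game_challenge diffs times limit → Pre_puzzle_game_challenge diffs times limit → Spec_puzzle_game_challenge diffs times limit (puzzle_game_challenge diffs times limit)

-- ===== LEMMAS AND PROOFS =====

-- the cost term A subtracts for puzzle i, at a given level
def pgcTerm (diffs times : List Int) (level : Int) (i : Int) : Int :=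
  if PySem.List.pyGetD diffs i 0 ≤ level then
    PySem.List.pyGetD times i 0
  else
    (PySem.List.pyGetD times i 0 + PySem.List.pyGetD times (i - 1) 0)
      * (PySem.List.pyGetD diffs i 0 - level)
    + PySem.List.pyGetD times i 0

-- the per-pair extra cost B accounts via suffix sums
def pgcG (level : Int) (p : Int × Int) : Int :=
  if p.1 ≤ level then 0 else p.2 * (p.1 - level)

-- abbreviations for B's precomputed data (proof-side only)
def pgcPairs (diffs times : List Int) : List (Int × Int) :=
  PySem.List.sorted
    ((PySem.List.pyRange 0 (diffs.length : Int)).map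
      (fun i => (PySem.List.pyGetD diffs i 0,
                 PySem.List.pyGetD times i 0 + PySem.List.pyGetD times (i - 1) 0)))
    (fun p => p.1)

def pgcDs (diffs times : List Int) : List Int :=
  (pgcPairs diffs times).map (fun p => p.1)

lemma pgcSuffix_headD (f : Int × Int → Int) (P : List (Int × Int)) :
    (pgcSuffix f P).headD 0 = (P.map f).sum := by
  induction P with
  | nil => rfl
  | cons p rest ih =>
      simp only [pgcSuffix, List.headD_cons, List.map_cons, List.sum_cons, ih]

lemma pgcSuffix_getD (f : Int × Int → Int) (P : List (Int × Int)) :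
    ∀ k, k ≤ P.length → (pgcSuffix f P).getD k 0 = ((P.drop k).map f).sum := by
  induction P with
  | nil =>
      intro k hk
      have : k = 0 := Nat.le_zero.mp hk
      subst this; rfl
  | cons p rest ih =>
      intro k hk
      cases k with
      | zero =>
          simp only [pgcSuffix, List.getD_cons_zero, List.drop_zero, List.map_cons,
            List.sum_cons, pgcSuffix_headD]
      | succ k =>
          simpa [pgcSuffix] using ih k (by simpa using hk)

lemma pgcFirstAbove_spec (ds : List Int) (level : Int)
    (hsort : ds.Pairwise (· ≤ ·)) :
    ∀ lo hi, hi ≤ ds.length → lo ≤ hi →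
      (∀ j, j < lo → ds.getD j 0 ≤ level) →
      (∀ j, hi ≤ j → j < ds.length → level < ds.getD j 0) →
      lo ≤ pgcFirstAbove ds level lo hi ∧ pgcFirstAbove ds level lo hi ≤ hi ∧
      (∀ j, j < pgcFirstAbove ds level lo hi → ds.getD j 0 ≤ level) ∧
      (∀ j, pgcFirstAbove ds level lo hi ≤ j → j < ds.length → level < ds.getD j 0) := by
  have hmono : ∀ i j, i ≤ j → (hj : j < ds.length) → ds.getD i 0 ≤ ds.getD j 0 := by
    intro i j hij hj
    rcases Nat.lt_or_ge i j with hlt | hge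
    · have hi : i < ds.length := lt_trans hlt hj
      rw [List.getD_eq_getElem ds 0 hi, List.getD_eq_getElem ds 0 hj]
      exact List.pairwise_iff_getElem.mp hsort i j hi hj hlt
    · have : i = j := le_antisymm hij hge
      subst this; exact le_refl _
  have main : ∀ N lo hi, hi - lo ≤ N → hi ≤ ds.length → lo ≤ hi →
      (∀ j, j < lo → ds.getD j 0 ≤ level) →
      (∀ j, hi ≤ j → j < ds.length → level < ds.getD j 0) →
      lo ≤ pgcFirstAbove ds level lo hi ∧ pgcFirstAbove ds level lo hi ≤ hi ∧
      (∀ j, j < pgcFirstAbove ds level lo hi → ds.getD j 0 ≤ level) ∧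
      (∀ j, pgcFirstAbove ds level lo hi ≤ j → j < ds.length → level < ds.getD j 0) := by
    intro N
    induction N with
    | zero =>
        intro lo hi hN hhi hlh inv1 inv2
        have heq : lo = hi := by omega
        rw [pgcFirstAbove]
        have : ¬ lo < hi := by omega
        simp only [this, dite_false]
        exact ⟨le_refl _, by omega, inv1, by subst heq; exact inv2⟩
    | succ N IH =>
        intro lo hi hN hhi hlh inv1 inv2
        by_cases hlt : lo < hi
        · have hm1 : lo ≤ (lo + hi) / 2 := by omega
          have hm2 : (lo + hi) / 2 < hi := by omega
          have hmlen : (lo + hi) / 2 < ds.length := lt_of_lt_of_le hm2 hhi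
          by_cases hle : ds.getD ((lo + hi) / 2) 0 ≤ level
          · have heq : pgcFirstAbove ds level lo hi =
                pgcFirstAbove ds level ((lo + hi) / 2 + 1) hi := by
              rw [pgcFirstAbove]; simp only [hlt, dite_true, hle, if_true]
            rw [heq]
            have inv1' : ∀ j, j < (lo + hi) / 2 + 1 → ds.getD j 0 ≤ level := by
              intro j hj
              by_cases hjlo : j < lo
              · exact inv1 j hjlo
              · exact le_trans (hmono j ((lo + hi) / 2) (by omega) hmlen) hle
            obtain ⟨h1, h2, h3, h4⟩ :=
              IH ((lo + hi) / 2 + 1) hi (by omega) hhi (by omega) inv1' inv2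
            exact ⟨by omega, h2, h3, h4⟩
          · have heq : pgcFirstAbove ds level lo hi =
                pgcFirstAbove ds level lo ((lo + hi) / 2) := by
              rw [pgcFirstAbove]; simp only [hlt, dite_true, hle, if_false]
            rw [heq]
            have inv2' : ∀ j, (lo + hi) / 2 ≤ j → j < ds.length → level < ds.getD j 0 := by
              intro j hj hjlen
              exact lt_of_not_ge (fun hc => hle (le_trans (hmono ((lo + hi) / 2) j hj hjlen) hc))
            obtain ⟨h1, h2, h3, h4⟩ :=
              IH lo ((lo + hi) / 2) (by omega) (by omega) hm1 inv1 inv2'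
            exact ⟨h1, by omega, h3, h4⟩
        · have heq : lo = hi := by omega
          rw [pgcFirstAbove]
          simp only [hlt, dite_false]
          exact ⟨le_refl _, by omega, inv1, by subst heq; exact inv2⟩
  intro lo hi hhi hlh inv1 inv2
  exact main (hi - lo) lo hi (le_refl _) hhi hlh inv1 inv2

lemma pgc_map_take (xs : List Int) (n : Nat) (h : n ≤ xs.length) :
    (PySem.List.pyRange 0 (n : Int)).map (fun j => PySem.List.pyGetD xs j 0) = xs.take n := by
  induction n with
  | zero =>
      rw [show ((0 : Nat) : Int) = (0 : Int) from rfl,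
        PySem.List.pyRange_one_eq_nil (le_refl 0)]
      rfl
  | succ n ih =>
      have hc : ((n + 1 : Nat) : Int) = (n : Int) + 1 := by push_cast; ring
      rw [hc, PySem.List.pyRange_one_succ_right (Int.natCast_nonneg n), List.map_append,
        ih (by omega)]
      have hn : n < xs.length := by omega
      rw [List.take_add_one, List.getElem?_eq_getElem hn]
      simp only [List.map_cons, List.map_nil, PySem.List.pyGetD_natCast,
        List.getD_eq_getElem xs 0 hn, Option.toList_some]

-- the two sides compute the same cost for every level
lemma pgc_cost_eq (diffs times : List Int) (level : Int)
    (hlen : diffs.length ≤ times.length) :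
    ((PySem.List.pyRange 0 (diffs.length : Int)).map (pgcTerm diffs times level)).sum =
      (PySem.List.slice times none (some (diffs.length : Int))).sum +
      ((pgcSuffix (fun p => p.2 * p.1) (pgcPairs diffs times)).getD
          (pgcFirstAbove (pgcDs diffs times) level 0 (pgcDs diffs times).length) 0
        - level * (pgcSuffix (fun p => p.2) (pgcPairs diffs times)).getD
          (pgcFirstAbove (pgcDs diffs times) level 0 (pgcDs diffs times).length) 0) := by
  set pf : Int → Int × Int := fun i =>
    (PySem.List.pyGetD diffs i 0,
     PySem.List.pyGetD times i 0 + PySem.List.pyGetD times (i - 1) 0) with hpf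
  set r := PySem.List.pyRange 0 (diffs.length : Int) with hr
  have hPdef : pgcPairs diffs times = PySem.List.sorted (r.map pf) (fun p => p.1) := rfl
  set P := pgcPairs diffs times with hP
  set ds := pgcDs diffs times with hds
  have hdsP : ds = P.map (fun p => p.1) := rfl
  have hperm : P.Perm (r.map pf) :=
    PySem.List.sorted_perm (r.map pf) (fun p => p.1) false
  have hpw : P.Pairwise (fun a b => a.1 ≤ b.1) :=
    PySem.List.sorted_pairwise (r.map pf) (fun p => p.1)
  have hdsw : ds.Pairwise (fun a b => a ≤ b) := by
    rw [hdsP]; exact List.Pairwise.map _ (fun a b h => h) hpw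
  have hlds : ds.length = P.length := by rw [hdsP]; simp
  obtain ⟨hk0, hkle, hbelow, habove⟩ :=
    pgcFirstAbove_spec ds level hdsw 0 ds.length (le_refl _) (Nat.zero_le _)
      (fun j hj => absurd hj (Nat.not_lt_zero j))
      (fun j h1 h2 => absurd (lt_of_le_of_lt h1 h2) (lt_irrefl _))
  set k := pgcFirstAbove ds level 0 ds.length with hk
  have hkP : k ≤ P.length := hlds ▸ hkle
  have hdsj : ∀ (j : Nat), (hj : j < P.length) → ds.getD j 0 = (P[j]).1 := by
    intro j hj
    rw [hdsP, List.getD_eq_getElem _ 0 (by simpa using hj), List.getElem_map]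
  have hterm : ∀ i ∈ r, pgcTerm diffs times level i =
      PySem.List.pyGetD times i 0 + pgcG level (pf i) := by
    intro i _
    rw [hpf]
    unfold pgcTerm pgcG
    by_cases h : PySem.List.pyGetD diffs i 0 ≤ level
    · simp [h]
    · simp only [h, if_false]; ring
  rw [List.map_congr_left hterm, PySem.List.sum_map_add_int]
  have h1 : (r.map (fun i => PySem.List.pyGetD times i 0)).sum =
      (PySem.List.slice times none (some (diffs.length : Int))).sum := by
    rw [hr, pgc_map_take times diffs.length hlen,
      PySem.List.slice_to times (Int.natCast_nonneg _)]
    simp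
  have h2 : (r.map (fun i => pgcG level (pf i))).sum = (P.map (pgcG level)).sum := by
    have hmm : r.map (fun i => pgcG level (pf i)) = (r.map pf).map (pgcG level) := by
      rw [List.map_map]; rfl
    rw [hmm]
    exact (List.Perm.sum_eq (hperm.map (pgcG level))).symm
  rw [h1, h2]
  have hsplit : (P.map (pgcG level)).sum =
      ((P.take k).map (pgcG level)).sum + ((P.drop k).map (pgcG level)).sum := by
    conv_lhs => rw [← List.take_append_drop k P]
    rw [List.map_append, List.sum_append]
  have htake0 : ((P.take k).map (pgcG level)).sum = 0 := by
    apply List.sum_eq_zero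
    intro y hy
    obtain ⟨x, hx, rfl⟩ := List.mem_map.mp hy
    obtain ⟨j, hj, rfl⟩ := List.mem_iff_getElem.mp hx
    have hj' : j < min k P.length := by simpa [List.length_take] using hj
    have hjk : j < k := lt_min_iff.mp hj' |>.1
    have hjP : j < P.length := lt_min_iff.mp hj' |>.2
    have hle := hbelow j hjk
    rw [hdsj j hjP] at hle
    rw [List.getElem_take]
    simp [pgcG, hle]
  have hdropmap : (P.drop k).map (pgcG level) =
      (P.drop k).map (fun x => x.2 * x.1 + (-level) * x.2) := by
    apply List.map_congr_left
    intro x hx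
    obtain ⟨j, hj, rfl⟩ := List.mem_iff_getElem.mp hx
    have hjlen : k + j < P.length := by
      have := hj; simp [List.length_drop] at this; omega
    have hgt := habove (k + j) (Nat.le_add_right _ _) (by omega)
    rw [hdsj (k + j) hjlen] at hgt
    rw [List.getElem_drop]
    simp only [pgcG, if_neg (not_le.mpr hgt)]
    ring
  rw [hsplit, htake0, hdropmap, PySem.List.sum_map_add_int, List.sum_map_mul_left,
    pgcSuffix_getD _ _ k hkP, pgcSuffix_getD _ _ k hkP]
  ring

lemma pgc_loop_eq (diffs times : List Int) (limit : Int)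
    (hlen : diffs.length ≤ times.length) :
    ∀ mn mx, pgcLoopA diffs times limit mn mx =
      pgcLoopB (PySem.List.slice times none (some (diffs.length : Int))).sum
        (pgcDs diffs times)
        (pgcSuffix (fun p => p.2) (pgcPairs diffs times))
        (pgcSuffix (fun p => p.2 * p.1) (pgcPairs diffs times)) limit mn mx := by
  have key : ∀ N mn mx, (mx - mn + 1).toNat ≤ N →
      pgcLoopA diffs times limit mn mx =
      pgcLoopB (PySem.List.slice times none (some (diffs.length : Int))).sum
        (pgcDs diffs times)
        (pgcSuffix (fun p => p.2) (pgcPairs diffs times))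
        (pgcSuffix (fun p => p.2 * p.1) (pgcPairs diffs times)) limit mn mx := by
    intro N
    induction N with
    | zero =>
        intro mn mx hN
        have hmm : ¬ mn ≤ mx := by omega
        rw [pgcLoopA, pgcLoopB]
        simp [hmm]
    | succ N ih =>
        intro mn mx hN
        by_cases hmm : mn ≤ mx
        · have hb := PySem.Int.floordiv_two_mid_bounds hmm
          rw [pgcLoopA, pgcLoopB, dif_pos hmm, dif_pos hmm]
          set level := PySem.Int.floordiv (mn + mx) 2 with hlevel
          show (if (List.foldl (fun lm i =>
                  if PySem.List.pyGetD diffs i 0 ≤ level then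
                    lm - PySem.List.pyGetD times i 0
                  else
                    lm - ((PySem.List.pyGetD times i 0 + PySem.List.pyGetD times (i - 1) 0)
                            * (PySem.List.pyGetD diffs i 0 - level)
                          + PySem.List.pyGetD times i 0)) limit
                  (PySem.List.pyRange 0 (diffs.length : Int))) ≥ 0 then
              pgcLoopA diffs times limit mn (level - 1)
            else pgcLoopA diffs times limit (level + 1) mx) =
            (if (PySem.List.slice times none (some (diffs.length : Int))).sum +
                ((pgcSuffix (fun p => p.2 * p.1) (pgcPairs diffs times)).getD
                    (pgcFirstAbove (pgcDs diffs times) level 0 (pgcDs diffs times).length) 0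
                  - level * (pgcSuffix (fun p => p.2) (pgcPairs diffs times)).getD
                    (pgcFirstAbove (pgcDs diffs times) level 0 (pgcDs diffs times).length) 0) ≤ limit then
              pgcLoopB (PySem.List.slice times none (some (diffs.length : Int))).sum
                (pgcDs diffs times) (pgcSuffix (fun p => p.2) (pgcPairs diffs times))
                (pgcSuffix (fun p => p.2 * p.1) (pgcPairs diffs times)) limit mn (level - 1)
            else
              pgcLoopB (PySem.List.slice times none (some (diffs.length : Int))).sum
                (pgcDs diffs times) (pgcSuffix (fun p => p.2) (pgcPairs diffs times))
                (pgcSuffix (fun p => p.2 * p.1) (pgcPairs diffs times)) limit (level + 1) mx)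
          have hcg : ∀ (acc : Int), ∀ i ∈ PySem.List.pyRange 0 (diffs.length : Int),
              (if PySem.List.pyGetD diffs i 0 ≤ level then
                 acc - PySem.List.pyGetD times i 0
               else
                 acc - ((PySem.List.pyGetD times i 0 + PySem.List.pyGetD times (i - 1) 0)
                          * (PySem.List.pyGetD diffs i 0 - level)
                        + PySem.List.pyGetD times i 0)) =
              acc + (-(pgcTerm diffs times level i)) := by
            intro acc i _
            unfold pgcTerm
            by_cases hc : PySem.List.pyGetD diffs i 0 ≤ level <;> simp [hc] <;> ring
          have hfold : (PySem.List.pyRange 0 (diffs.length : Int)).foldl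
              (fun lm i =>
                if PySem.List.pyGetD diffs i 0 ≤ level then
                  lm - PySem.List.pyGetD times i 0
                else
                  lm - ((PySem.List.pyGetD times i 0 + PySem.List.pyGetD times (i - 1) 0)
                          * (PySem.List.pyGetD diffs i 0 - level)
                        + PySem.List.pyGetD times i 0)) limit =
              limit - ((PySem.List.pyRange 0 (diffs.length : Int)).map
                (pgcTerm diffs times level)).sum := by
            rw [PySem.List.foldl_congr_mem _ _ _ _ hcg, PySem.List.foldl_add]
            have hneg : ((PySem.List.pyRange 0 (diffs.length : Int)).map
                (fun i => -(pgcTerm diffs times level i))).sum =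
                -(((PySem.List.pyRange 0 (diffs.length : Int)).map
                  (pgcTerm diffs times level)).sum) := by
              rw [show (fun i => -(pgcTerm diffs times level i)) =
                  (fun i => (-1) * pgcTerm diffs times level i) from by funext i; ring,
                List.sum_map_mul_left]
              ring
            rw [hneg]; ring
          rw [hfold, pgc_cost_eq diffs times level hlen]
          by_cases hc : (PySem.List.slice times none (some (diffs.length : Int))).sum +
              ((pgcSuffix (fun p => p.2 * p.1) (pgcPairs diffs times)).getD
                  (pgcFirstAbove (pgcDs diffs times) level 0 (pgcDs diffs times).length) 0
                - level * (pgcSuffix (fun p => p.2) (pgcPairs diffs times)).getD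
                  (pgcFirstAbove (pgcDs diffs times) level 0 (pgcDs diffs times).length) 0) ≤ limit
          · rw [if_pos (by linarith), if_pos hc]
            exact ih mn (level - 1) (by omega)
          · rw [if_neg (by intro hge; exact hc (by linarith)), if_neg hc]
            exact ih (level + 1) mx (by omega)
        · rw [pgcLoopA, pgcLoopB, dif_neg hmm, dif_neg hmm]
  intro mn mx
  exact key (mx - mn + 1).toNat mn mx (le_refl _)

-- ===== VERDICT (by name: the statement is the Claim_ definition above) =====
theorem puzzle_game_challenge_spec : Claim_equal_puzzle_game_challenge := by
  intro diffs times limit _hdom hpre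
  unfold Spec_puzzle_game_challenge
  unfold puzzle_game_challenge puzzle_game_challenge_alt
  exact pgc_loop_eq diffs times limit hpre.2 _ _
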